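-- pv_equiv track=rewrite | github.com/ivo-bass/SoftUni-Solutions | python_advanced/multidimensional_lists_EXERCISE/6_knight_game.py | find_best_knight
-- ===== SOURCE A (Python) =====
-- ROW_MOVES = [-2, -2, 2, 2, -1, -1, 1, 1]
--
-- COL_MOVES = [-1, 1, -1, 1, -2, 2, -2, 2]
--
-- KNIGHT = 'K'
--
-- def is_valid(m, r_i, c_i):
--     size = len(m)
--     if 0 <= r_i < size and 0 <= c_i < size:
--         return True
--     return False
--
-- def calculate_kills(m, r, c):
--     kills = 0
--     change_row = ROW_MOVES
--     change_col = COL_MOVES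
--     for i in range(len(change_row)):
--         new_row = r + change_row[i]
--         new_col = c + change_col[i]
--         if is_valid(m, new_row, new_col):
--             position = m[new_row][new_col]
--             if position == KNIGHT:
--                 kills += 1
--     return kills
--
-- def find_best_knight(matrix):
--     most_kills = 0
--     best_knight = None
--     for row_index in range(len(matrix)):
--         for col_index in range(len(matrix)):
--             if matrix[row_index][col_index] == KNIGHT:
--                 current_kills = calculate_kills(matrix, row_index, col_index)
--                 if current_kills > most_kills:
--                     most_kills = current_kills
--                     best_knight = (row_index, col_index)
--     return best_knight
-- ===== SOURCE B (Python) =====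
-- MOVES = [(-2, -1), (-2, 1), (2, -1), (2, 1), (-1, -2), (-1, 2), (1, -2), (1, 2)]
--
-- KNIGHT = 'K'
--
--
-- def find_best_knight(matrix):
--     n = len(matrix)
--     # Pass 1: every knight deposits one "attack" into each of its in-board
--     # knight-move targets; by symmetry of the move set, count[(r, c)] ends up
--     # equal to the number of knights that knight (r, c) would kill.
--     count = {}
--     for r in range(n):
--         for c in range(n):
--             if matrix[r][c] == KNIGHT:
--                 for dr, dc in MOVES:
--                     nr, nc = r + dr, c + dc
--                     if 0 <= nr < n and 0 <= nc < n:
--                         count[(nr, nc)] = count.get((nr, nc), 0) + 1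
--     # Pass 2: row-major scan of knight cells, strictly-greater wins (ties keep
--     # the earlier cell, and a knight with 0 kills never replaces None).
--     most_kills = 0
--     best_knight = None
--     for r in range(n):
--         for c in range(n):
--             if matrix[r][c] == KNIGHT:
--                 kills = count.get((r, c), 0)
--                 if kills > most_kills:
--                     most_kills = kills
--                     best_knight = (r, c)
--     return best_knight
-- ===== Notes on version B (the rewrite author's own statement) =====
-- stated objective: alternative
-- what changed: Replaces per-knight scanning of the 8 neighbour cells (nested indexings into the board inside the scan) by an inverted two-pass scheme: a first pass where each knight deposits one attack into a count table at each of its in-board knight-move targets (correct by symmetry of the move set), then a row-major max pass over knight cells reading only the table.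
import Mathlib
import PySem

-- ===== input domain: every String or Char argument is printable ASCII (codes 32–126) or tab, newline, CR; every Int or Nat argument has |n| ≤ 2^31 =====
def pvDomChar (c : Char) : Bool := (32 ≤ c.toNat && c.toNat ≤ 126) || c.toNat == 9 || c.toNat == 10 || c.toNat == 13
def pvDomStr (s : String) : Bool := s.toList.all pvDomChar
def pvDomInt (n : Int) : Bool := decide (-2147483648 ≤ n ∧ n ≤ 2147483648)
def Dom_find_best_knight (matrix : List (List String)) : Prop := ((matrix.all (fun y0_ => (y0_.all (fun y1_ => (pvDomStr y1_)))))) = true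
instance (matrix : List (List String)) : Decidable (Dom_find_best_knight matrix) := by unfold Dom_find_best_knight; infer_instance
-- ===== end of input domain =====

-- B replaces per-knight scanning of the 8 neighbour cells by a two-pass scheme (deposit attack
-- counts into a dict keyed by cell, then a row-major max pass); equal return value proved below.

-- ===== PORT A =====
def ROW_MOVES : List Int := [-2, -2, 2, 2, -1, -1, 1, 1]

def COL_MOVES : List Int := [-1, 1, -1, 1, -2, 2, -2, 2]

def KNIGHT : String := "K"

def is_valid (m : List (List String)) (r_i c_i : Int) : Bool :=
  let size : Int := m.length
  if 0 ≤ r_i ∧ r_i < size ∧ 0 ≤ c_i ∧ c_i < size then true else false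

def calculate_kills (m : List (List String)) (r c : Int) : Int :=
  (PySem.List.pyRange 0 (ROW_MOVES.length : Int) 1).foldl (fun kills i =>
    let new_row := r + PySem.List.pyGetD ROW_MOVES i 0
    let new_col := c + PySem.List.pyGetD COL_MOVES i 0
    if is_valid m new_row new_col then
      let position := PySem.List.pyGetD (PySem.List.pyGetD m new_row []) new_col ""
      if position = KNIGHT then kills + 1 else kills
    else kills) 0

def find_best_knight (matrix : List (List String)) : Option (Int × Int) :=
  let n : Int := matrix.length
  (((PySem.List.pyRange 0 n 1).foldl (fun s row_index =>
    (PySem.List.pyRange 0 n 1).foldl (fun s col_index =>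
      if PySem.List.pyGetD (PySem.List.pyGetD matrix row_index []) col_index "" = KNIGHT then
        let current_kills := calculate_kills matrix row_index col_index
        if current_kills > s.1 then (current_kills, some (row_index, col_index)) else s
      else s) s) ((0 : Int), (none : Option (Int × Int)))) : Int × Option (Int × Int)).2

-- ===== PORT B =====
def MOVES : List (Int × Int) := [(-2, -1), (-2, 1), (2, -1), (2, 1), (-1, -2), (-1, 2), (1, -2), (1, 2)]

def build_count (matrix : List (List String)) (n : Int) : PySem.Dict (Int × Int) Int :=
  (PySem.List.pyRange 0 n 1).foldl (fun d r =>
    (PySem.List.pyRange 0 n 1).foldl (fun d c =>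
      if PySem.List.pyGetD (PySem.List.pyGetD matrix r []) c "" = KNIGHT then
        MOVES.foldl (fun d mv =>
          let nr := r + mv.1
          let nc := c + mv.2
          if 0 ≤ nr ∧ nr < n ∧ 0 ≤ nc ∧ nc < n then
            d.insert (nr, nc) (d.getD (nr, nc) 0 + 1)
          else d) d
      else d) d) PySem.Dict.empty

def find_best_knight_alt (matrix : List (List String)) : Option (Int × Int) :=
  let n : Int := matrix.length
  let count := build_count matrix n
  (((PySem.List.pyRange 0 n 1).foldl (fun s r =>
    (PySem.List.pyRange 0 n 1).foldl (fun s c =>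
      if PySem.List.pyGetD (PySem.List.pyGetD matrix r []) c "" = KNIGHT then
        let kills := count.getD (r, c) 0
        if kills > s.1 then (kills, some (r, c)) else s
      else s) s) ((0 : Int), (none : Option (Int × Int)))) : Int × Option (Int × Int)).2

-- ===== PRECONDITION & SPEC =====
-- Pre_ excludes exactly the ragged boards on which Python A raises IndexError: A indexes every
-- cell matrix[r][c] with r, c < len(matrix), so it raises iff some row is shorter than len(matrix).
def Pre_find_best_knight (matrix : List (List String)) : Prop :=
  ∀ row ∈ matrix, (matrix.length : Int) ≤ (row.length : Int)
instance (matrix : List (List String)) : Decidable (Pre_find_best_knight matrix) := by unfold Pre_find_best_knight; infer_instance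

def pvWitness_find_best_knight : List (List String) :=
  [["K", ".", "K"], [".", ".", "."], [".", "K", "."]]

def Spec_find_best_knight (matrix : List (List String)) (out : Option (Int × Int)) : Prop := out = find_best_knight_alt matrix
instance (matrix : List (List String)) (out : Option (Int × Int)) : Decidable (Spec_find_best_knight matrix out) := by unfold Spec_find_best_knight; infer_instance

-- ===== CLAIM (what is proved, stated in full; the proofs are below) =====
def Claim_equal_find_best_knight : Prop := ∀ (matrix : List (List String)), Dom_find_best_knight matrix → Pre_find_best_knight matrix → Spec_find_best_knight matrix (find_best_knight matrix)

-- ===== LEMMAS AND PROOFS =====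

-- fold-shape helpers
theorem pvFoldlFlatMap {a b d : Type} (l : List a) (g : a → List b) (f : d → b → d) (init : d) :
    l.foldl (fun acc x => (g x).foldl f acc) init = (l.flatMap g).foldl f init := by
  induction l generalizing init with
  | nil => rfl
  | cons x tl ih => simp only [List.foldl_cons, List.flatMap_cons, List.foldl_append, ih]

theorem pvFoldlIte {a k d : Type} (l : List a) (p : a → Prop) [DecidablePred p] (t : a → k)
    (f : d → k → d) (init : d) :
    l.foldl (fun acc x => if p x then f acc (t x) else acc) init
      = (l.flatMap (fun x => if p x then [t x] else [])).foldl f init := by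
  induction l generalizing init with
  | nil => rfl
  | cons x tl ih =>
    by_cases h : p x <;> simp only [List.foldl_cons, List.flatMap_cons, h, if_pos, if_neg,
      not_false_iff, List.foldl_append, List.foldl_cons, List.foldl_nil, ih]

-- the multiset of "attack deposits" B's first pass makes
def pvDeposits (matrix : List (List String)) (n : Int) : List (Int × Int) :=
  (PySem.List.pyRange 0 n 1).flatMap (fun r =>
    (PySem.List.pyRange 0 n 1).flatMap (fun c =>
      if PySem.List.pyGetD (PySem.List.pyGetD matrix r []) c "" = KNIGHT then
        MOVES.flatMap (fun mv =>
          if 0 ≤ r + mv.1 ∧ r + mv.1 < n ∧ 0 ≤ c + mv.2 ∧ c + mv.2 < n then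
            [(r + mv.1, c + mv.2)]
          else [])
      else []))

theorem pvBuildCountEq (matrix : List (List String)) (n : Int) :
    build_count matrix n
      = (pvDeposits matrix n).foldl (fun d k => d.insert k (d.getD k 0 + 1)) PySem.Dict.empty := by
  unfold build_count pvDeposits
  rw [← pvFoldlFlatMap]
  apply PySem.List.foldl_congr_mem
  intro d r _
  rw [← pvFoldlFlatMap]
  apply PySem.List.foldl_congr_mem
  intro d' c _
  by_cases h : PySem.List.pyGetD (PySem.List.pyGetD matrix r []) c "" = KNIGHT
  · simp only [h, if_pos]
    exact pvFoldlIte MOVES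
      (fun mv => 0 ≤ r + mv.1 ∧ r + mv.1 < n ∧ 0 ≤ c + mv.2 ∧ c + mv.2 < n)
      (fun mv => (r + mv.1, c + mv.2))
      (fun d k => d.insert k (d.getD k 0 + 1)) d'
  · simp [h]

theorem pvGetDCount (matrix : List (List String)) (n : Int) (t : Int × Int) :
    (build_count matrix n).getD t 0 = ((pvDeposits matrix n).count t : Int) := by
  rw [pvBuildCountEq, PySem.Dict.getD_foldl_insert_add_one]
  simp [pysem]

theorem pvSumCongr {a : Type} (l : List a) (f g : a → Int) (h : ∀ x ∈ l, f x = g x) :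
    (l.map f).sum = (l.map g).sum := by rw [List.map_congr_left h]

theorem pvSumDelta (l : List Int) (hl : l.Nodup) (a : Int) (f : Int → Int) :
    (l.map (fun x => if x = a then f x else 0)).sum = if a ∈ l then f a else 0 := by
  induction l with
  | nil => simp
  | cons x tl ih =>
    rcases List.nodup_cons.mp hl with ⟨hx, htl⟩
    by_cases h : x = a
    · subst h
      have hz : (tl.map (fun y => if y = x then f y else 0)).sum = 0 := by
        apply List.sum_eq_zero
        intro y hy
        obtain ⟨z, hz, rfl⟩ := List.mem_map.mp hy
        rw [if_neg]
        rintro rfl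
        exact hx hz
      simp [hz]
    · have h' : ¬ a = x := fun e => h e.symm
      simp [h, h', ih htl]

theorem pvGridDelta (n a b : Int) (P : Int → Int → Prop) [inst : ∀ x y, Decidable (P x y)] :
    ((PySem.List.pyRange 0 n 1).map (fun r =>
      ((PySem.List.pyRange 0 n 1).map (fun c =>
        if r = a ∧ c = b ∧ P r c then (1 : Int) else 0)).sum)).sum
    = if 0 ≤ a ∧ a < n ∧ 0 ≤ b ∧ b < n ∧ P a b then 1 else 0 := by
  have h1 : ∀ r : Int,
      ((PySem.List.pyRange 0 n 1).map (fun c =>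
        if r = a ∧ c = b ∧ P r c then (1 : Int) else 0)).sum
      = if r = a then (if 0 ≤ b ∧ b < n ∧ P r b then 1 else 0) else 0 := by
    intro r
    have := pvSumCongr (PySem.List.pyRange 0 n 1)
      (fun c => if r = a ∧ c = b ∧ P r c then (1 : Int) else 0)
      (fun c => if c = b then (if r = a ∧ P r c then (1 : Int) else 0) else 0)
      (by
        intro c _
        by_cases h1 : r = a <;> by_cases h2 : c = b <;> simp [h1, h2])
    rw [this, pvSumDelta _ (PySem.List.nodup_pyRange_one 0 n) b
      (fun c => if r = a ∧ P r c then (1 : Int) else 0)]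
    simp only [PySem.List.mem_pyRange_one]
    by_cases hb : 0 ≤ b ∧ b < n <;> by_cases hr : r = a <;>
      by_cases hp : P r b <;> simp [hb, hr, hp] <;> tauto
  rw [pvSumCongr (PySem.List.pyRange 0 n 1) _ _ (fun r _ => h1 r),
    pvSumDelta _ (PySem.List.nodup_pyRange_one 0 n) a
      (fun r => if 0 ≤ b ∧ b < n ∧ P r b then (1 : Int) else 0)]
  simp only [PySem.List.mem_pyRange_one]
  by_cases ha : 0 ≤ a ∧ a < n <;> by_cases hb : 0 ≤ b ∧ b < n <;>
    by_cases hp : P a b <;> simp [ha, hb, hp]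

-- the indicator "cell (x, y) is an in-board knight"
def pvAtom (matrix : List (List String)) (a b : Int) : Int :=
  if 0 ≤ a ∧ a < (matrix.length : Int) ∧ 0 ≤ b ∧ b < (matrix.length : Int) ∧
      PySem.List.pyGetD (PySem.List.pyGetD matrix a []) b "" = KNIGHT then 1 else 0

theorem pvStep (matrix : List (List String)) (a b x : Int) :
    (if is_valid matrix a b then
      (if PySem.List.pyGetD (PySem.List.pyGetD matrix a []) b "" = KNIGHT then x + 1 else x)
    else x) = x + pvAtom matrix a b := by
  unfold is_valid pvAtom
  by_cases h1 : 0 ≤ a ∧ a < (matrix.length : Int) ∧ 0 ≤ b ∧ b < (matrix.length : Int) <;>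
    by_cases h2 : PySem.List.pyGetD (PySem.List.pyGetD matrix a []) b "" = KNIGHT <;>
      simp [h1, h2]

theorem pvCalcExpand (matrix : List (List String)) (r c : Int) :
    calculate_kills matrix r c
      = pvAtom matrix (r - 2) (c - 1) + pvAtom matrix (r - 2) (c + 1)
      + pvAtom matrix (r + 2) (c - 1) + pvAtom matrix (r + 2) (c + 1)
      + pvAtom matrix (r - 1) (c - 2) + pvAtom matrix (r - 1) (c + 2)
      + pvAtom matrix (r + 1) (c - 2) + pvAtom matrix (r + 1) (c + 2) := by
  have hm2 : ∀ x : Int, x + -2 = x - 2 := fun x => by ring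
  have hm1 : ∀ x : Int, x + -1 = x - 1 := fun x => by ring
  unfold calculate_kills
  rw [show (PySem.List.pyRange 0 ((ROW_MOVES.length : Nat) : Int) 1) = [0,1,2,3,4,5,6,7] from rfl]
  simp only [List.foldl_cons, List.foldl_nil]
  simp only [show PySem.List.pyGetD ROW_MOVES 0 0 = -2 from rfl,
    show PySem.List.pyGetD ROW_MOVES 1 0 = -2 from rfl,
    show PySem.List.pyGetD ROW_MOVES 2 0 = 2 from rfl,
    show PySem.List.pyGetD ROW_MOVES 3 0 = 2 from rfl,
    show PySem.List.pyGetD ROW_MOVES 4 0 = -1 from rfl,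
    show PySem.List.pyGetD ROW_MOVES 5 0 = -1 from rfl,
    show PySem.List.pyGetD ROW_MOVES 6 0 = 1 from rfl,
    show PySem.List.pyGetD ROW_MOVES 7 0 = 1 from rfl,
    show PySem.List.pyGetD COL_MOVES 0 0 = -1 from rfl,
    show PySem.List.pyGetD COL_MOVES 1 0 = 1 from rfl,
    show PySem.List.pyGetD COL_MOVES 2 0 = -1 from rfl,
    show PySem.List.pyGetD COL_MOVES 3 0 = 1 from rfl,
    show PySem.List.pyGetD COL_MOVES 4 0 = -2 from rfl,
    show PySem.List.pyGetD COL_MOVES 5 0 = 2 from rfl,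
    show PySem.List.pyGetD COL_MOVES 6 0 = -2 from rfl,
    show PySem.List.pyGetD COL_MOVES 7 0 = 2 from rfl]
  simp only [pvStep, hm2, hm1]
  ring

theorem pvPercell (matrix : List (List String)) (n r' c' r c : Int)
    (hr0 : 0 ≤ r) (hr1 : r < n) (hc0 : 0 ≤ c) (hc1 : c < n) :
    (((if PySem.List.pyGetD (PySem.List.pyGetD matrix r' []) c' "" = KNIGHT then
        MOVES.flatMap (fun mv =>
          if 0 ≤ r' + mv.1 ∧ r' + mv.1 < n ∧ 0 ≤ c' + mv.2 ∧ c' + mv.2 < n then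
            [(r' + mv.1, c' + mv.2)]
          else [])
      else []).count (r, c) : Nat) : Int)
    = (MOVES.map (fun mv =>
        if r' = r - mv.1 ∧ c' = c - mv.2 ∧
            PySem.List.pyGetD (PySem.List.pyGetD matrix r' []) c' "" = KNIGHT
        then (1 : Int) else 0)).sum := by
  by_cases hK : PySem.List.pyGetD (PySem.List.pyGetD matrix r' []) c' "" = KNIGHT
  · rw [if_pos hK, List.count_flatMap, Nat.cast_list_sum, List.map_map]
    apply pvSumCongr
    intro mv _
    by_cases hp : 0 ≤ r' + mv.1 ∧ r' + mv.1 < n ∧ 0 ≤ c' + mv.2 ∧ c' + mv.2 < n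
    · simp only [Function.comp_apply, hp, if_pos, hK, and_true]
      by_cases he : (r' + mv.1, c' + mv.2) = (r, c)
      · rw [Prod.mk.injEq] at he
        have : r' = r - mv.1 ∧ c' = c - mv.2 := by omega
        simp [this]
      · rw [Prod.mk.injEq] at he
        have hne : ¬ (r' = r - mv.1 ∧ c' = c - mv.2) := by omega
        simp [he, hne]
    · have hne : ¬ (r' = r - mv.1 ∧ c' = c - mv.2 ∧
          PySem.List.pyGetD (PySem.List.pyGetD matrix r' []) c' "" = KNIGHT) := by
        rintro ⟨e1, e2, -⟩
        exact hp ⟨by omega, by omega, by omega, by omega⟩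
      simp [hp, hne]
  · simp [hK]

theorem pvDepositsCount (matrix : List (List String)) (r c : Int)
    (hr0 : 0 ≤ r) (hr1 : r < (matrix.length : Int)) (hc0 : 0 ≤ c) (hc1 : c < (matrix.length : Int)) :
    ((pvDeposits matrix (matrix.length : Int)).count (r, c) : Int) = calculate_kills matrix r c := by
  rw [pvCalcExpand]
  unfold pvDeposits
  rw [List.count_flatMap, Nat.cast_list_sum, List.map_map]
  rw [pvSumCongr _ _
    (fun r' => ((PySem.List.pyRange 0 (matrix.length : Int) 1).map (fun c' =>
      (MOVES.map (fun mv =>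
        if r' = r - mv.1 ∧ c' = c - mv.2 ∧
            PySem.List.pyGetD (PySem.List.pyGetD matrix r' []) c' "" = KNIGHT
        then (1 : Int) else 0)).sum)).sum)
    (by
      intro r' _
      simp only [Function.comp_apply]
      rw [List.count_flatMap, Nat.cast_list_sum, List.map_map]
      apply pvSumCongr
      intro c' _
      exact pvPercell matrix (matrix.length : Int) r' c' r c hr0 hr1 hc0 hc1)]
  simp only [MOVES, List.map_cons, List.map_nil, List.sum_cons, List.sum_nil, add_zero]
  simp only [PySem.List.sum_map_add_int]
  simp only [pvGridDelta]
  simp only [sub_neg_eq_add]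
  simp only [pvAtom]
  ring

-- getD of the count dict at an in-board cell = A's per-knight kill count
theorem find_best_knight_key (matrix : List (List String)) (r c : Int)
    (hr0 : 0 ≤ r) (hr1 : r < (matrix.length : Int)) (hc0 : 0 ≤ c) (hc1 : c < (matrix.length : Int)) :
    (build_count matrix (matrix.length : Int)).getD (r, c) 0 = calculate_kills matrix r c := by
  rw [pvGetDCount]
  exact pvDepositsCount matrix r c hr0 hr1 hc0 hc1


-- ===== VERDICT (by name: the statement is the Claim_ definition above) =====
theorem find_best_knight_spec : Claim_equal_find_best_knight := by
  intro matrix _ _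
  unfold Spec_find_best_knight find_best_knight find_best_knight_alt
  simp only []
  congr 1
  apply PySem.List.foldl_congr_mem
  intro s r hrmem
  apply PySem.List.foldl_congr_mem
  intro s' c hcmem
  rw [PySem.List.mem_pyRange_one] at hrmem hcmem
  rw [find_best_knight_key matrix r c hrmem.1 hrmem.2 hcmem.1 hcmem.2]
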